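-- pv_equiv track=rewrite | github.com/michael-wojtas/Szyfrowanie | plotkowe.py | szyfr
-- ===== SOURCE A (Python) =====
-- def szyfr(tekst):
--   n = len(tekst)
--   wynik = ""
--
--   for i in range(0, n, 4):
--     wynik += tekst[i]
--
--   for i in range(1, n, 2):
--     wynik += tekst[i]
--
--   for i in range(2, n, 4):
--     wynik += tekst[i]
--
--   return wynik
-- ===== SOURCE B (Python) =====
-- def szyfr(tekst):
--   a = ""
--   b = ""
--   c = ""
--   for i in range(len(tekst)):
--     ch = tekst[i]
--     if i % 4 == 0:
--       a += ch
--     elif i % 4 == 2: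
--       c += ch
--     else:
--       b += ch
--   return a + b + c
-- ===== Notes on version B (the rewrite author's own statement) =====
-- stated objective: simpler
-- what changed: Replaces A's three separate passes over the string (strides 4, 2, 4) by a single ascending pass that routes each character into one of three accumulators by i % 4 and concatenates them at the end.
import Mathlib
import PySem

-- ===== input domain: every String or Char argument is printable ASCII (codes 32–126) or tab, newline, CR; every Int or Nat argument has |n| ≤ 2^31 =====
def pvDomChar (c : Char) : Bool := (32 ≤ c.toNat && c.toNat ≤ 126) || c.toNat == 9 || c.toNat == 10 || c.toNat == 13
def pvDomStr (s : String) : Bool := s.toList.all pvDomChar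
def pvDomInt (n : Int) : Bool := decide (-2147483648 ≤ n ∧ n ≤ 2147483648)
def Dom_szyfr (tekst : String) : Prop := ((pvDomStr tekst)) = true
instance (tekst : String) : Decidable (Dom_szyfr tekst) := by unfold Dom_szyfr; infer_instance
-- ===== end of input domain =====

-- B replaces A's three strided passes over the string by one ascending pass that routes
-- each character into one of three accumulators by i % 4 (objective: simpler).

-- ===== PORT A =====
-- three loops: for i in range(0,n,4) / range(1,n,2) / range(2,n,4): wynik += tekst[i]
-- tekst[i] is ported as (pyGet? …).toList: the none (IndexError) branch is unreachable
-- since every index produced by the ranges is in [0, n).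
def szyfr (tekst : String) : String :=
  let cs : List Char := tekst.toList
  let n : Int := PySem.Str.len tekst
  let w1 := (PySem.List.pyRange 0 n 4).foldl
      (fun w i => w ++ (PySem.List.pyGet? cs i).toList) []
  let w2 := (PySem.List.pyRange 1 n 2).foldl
      (fun w i => w ++ (PySem.List.pyGet? cs i).toList) w1
  let w3 := (PySem.List.pyRange 2 n 4).foldl
      (fun w i => w ++ (PySem.List.pyGet? cs i).toList) w2
  String.ofList w3

-- ===== PORT B =====
-- one pass over range(n) with three accumulators (a, b, c), dispatch on i % 4
def szyfr_alt (tekst : String) : String :=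
  let cs : List Char := tekst.toList
  let n : Int := PySem.Str.len tekst
  let r := (PySem.List.pyRange 0 n 1).foldl
      (fun (s : List Char × List Char × List Char) i =>
        let ch := (PySem.List.pyGet? cs i).toList
        if PySem.Int.mod i 4 = 0 then (s.1 ++ ch, s.2.1, s.2.2)
        else if PySem.Int.mod i 4 = 2 then (s.1, s.2.1, s.2.2 ++ ch)
        else (s.1, s.2.1 ++ ch, s.2.2))
      ([], [], [])
  String.ofList (r.1 ++ r.2.1 ++ r.2.2)

-- ===== PRECONDITION & SPEC =====
def Spec_szyfr (tekst : String) (out : String) : Prop := out = szyfr_alt tekst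
instance (tekst : String) (out : String) : Decidable (Spec_szyfr tekst out) := by unfold Spec_szyfr; infer_instance

-- ===== CLAIM (what is proved, stated in full; the proofs are below) =====
def Claim_equal_szyfr : Prop := ∀ (tekst : String), Dom_szyfr tekst → Spec_szyfr tekst (szyfr tekst)

-- ===== LEMMAS AND PROOFS =====

-- appending one element on the right of a strided range (step 4, residues 0 and 2; step 2, residue 1)
lemma pvRange4_succ0 (m : Nat) :
    PySem.List.pyRange 0 ((m : Int) + 1) 4 =
      PySem.List.pyRange 0 (m : Int) 4 ++ (if m % 4 = 0 then [(m : Int)] else []) := by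
  rw [PySem.List.pyRange_of_pos _ _ (by norm_num), PySem.List.pyRange_of_pos _ _ (by norm_num)]
  by_cases h : m % 4 = 0
  · rw [if_pos h]
    have hL : (if (0:Int) < (m:Int) + 1 then (((m:Int) + 1 - 0 + 4 - 1) / 4).toNat else 0)
        = (if (0:Int) < (m:Int) then (((m:Int) - 0 + 4 - 1) / 4).toNat else 0) + 1 := by
      split_ifs <;> omega
    rw [hL, List.range_succ, List.map_append]
    congr 1
    simp only [List.map_cons, List.map_nil, List.cons.injEq, and_true]
    split_ifs <;> omega
  · rw [if_neg h]
    have hL : (if (0:Int) < (m:Int) + 1 then (((m:Int) + 1 - 0 + 4 - 1) / 4).toNat else 0)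
        = (if (0:Int) < (m:Int) then (((m:Int) - 0 + 4 - 1) / 4).toNat else 0) := by
      split_ifs <;> omega
    rw [hL, List.append_nil]

lemma pvRange2_succ1 (m : Nat) :
    PySem.List.pyRange 1 ((m : Int) + 1) 2 =
      PySem.List.pyRange 1 (m : Int) 2 ++ (if m % 2 = 1 then [(m : Int)] else []) := by
  rw [PySem.List.pyRange_of_pos _ _ (by norm_num), PySem.List.pyRange_of_pos _ _ (by norm_num)]
  by_cases h : m % 2 = 1
  · rw [if_pos h]
    have hL : (if (1:Int) < (m:Int) + 1 then (((m:Int) + 1 - 1 + 2 - 1) / 2).toNat else 0)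
        = (if (1:Int) < (m:Int) then (((m:Int) - 1 + 2 - 1) / 2).toNat else 0) + 1 := by
      split_ifs <;> omega
    rw [hL, List.range_succ, List.map_append]
    congr 1
    simp only [List.map_cons, List.map_nil, List.cons.injEq, and_true]
    split_ifs <;> omega
  · rw [if_neg h]
    have hL : (if (1:Int) < (m:Int) + 1 then (((m:Int) + 1 - 1 + 2 - 1) / 2).toNat else 0)
        = (if (1:Int) < (m:Int) then (((m:Int) - 1 + 2 - 1) / 2).toNat else 0) := by
      split_ifs <;> omega
    rw [hL, List.append_nil]

lemma pvRange4_succ2 (m : Nat) :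
    PySem.List.pyRange 2 ((m : Int) + 1) 4 =
      PySem.List.pyRange 2 (m : Int) 4 ++ (if m % 4 = 2 then [(m : Int)] else []) := by
  rw [PySem.List.pyRange_of_pos _ _ (by norm_num), PySem.List.pyRange_of_pos _ _ (by norm_num)]
  by_cases h : m % 4 = 2
  · rw [if_pos h]
    have hL : (if (2:Int) < (m:Int) + 1 then (((m:Int) + 1 - 2 + 4 - 1) / 4).toNat else 0)
        = (if (2:Int) < (m:Int) then (((m:Int) - 2 + 4 - 1) / 4).toNat else 0) + 1 := by
      split_ifs <;> omega
    rw [hL, List.range_succ, List.map_append]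
    congr 1
    simp only [List.map_cons, List.map_nil, List.cons.injEq, and_true]
    split_ifs <;> omega
  · rw [if_neg h]
    have hL : (if (2:Int) < (m:Int) + 1 then (((m:Int) + 1 - 2 + 4 - 1) / 4).toNat else 0)
        = (if (2:Int) < (m:Int) then (((m:Int) - 2 + 4 - 1) / 4).toNat else 0) := by
      split_ifs <;> omega
    rw [hL, List.append_nil]

-- B's single pass computes exactly the three strided flatMaps that A's three loops produce
lemma pvBfold (cs : List Char) (m : Nat) :
    (PySem.List.pyRange 0 (m : Int) 1).foldl
      (fun (s : List Char × List Char × List Char) i =>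
        let ch := (PySem.List.pyGet? cs i).toList
        if PySem.Int.mod i 4 = 0 then (s.1 ++ ch, s.2.1, s.2.2)
        else if PySem.Int.mod i 4 = 2 then (s.1, s.2.1, s.2.2 ++ ch)
        else (s.1, s.2.1 ++ ch, s.2.2))
      ([], [], []) =
    ((PySem.List.pyRange 0 (m : Int) 4).flatMap (fun i => (PySem.List.pyGet? cs i).toList),
     (PySem.List.pyRange 1 (m : Int) 2).flatMap (fun i => (PySem.List.pyGet? cs i).toList),
     (PySem.List.pyRange 2 (m : Int) 4).flatMap (fun i => (PySem.List.pyGet? cs i).toList)) := by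
  induction m with
  | zero =>
    have e1 : PySem.List.pyRange 0 0 1 = [] := by decide
    have ea : PySem.List.pyRange 0 0 4 = [] := by decide
    have eb : PySem.List.pyRange 1 0 2 = [] := by decide
    have ec : PySem.List.pyRange 2 0 4 = [] := by decide
    simp [e1, ea, eb, ec]
  | succ k ih =>
    have hcast : ((k + 1 : Nat) : Int) = (k : Int) + 1 := by push_cast; ring
    rw [hcast, PySem.List.pyRange_one_succ_right (by positivity), List.foldl_append, ih,
        pvRange4_succ0 k, pvRange2_succ1 k, pvRange4_succ2 k]
    simp only [List.foldl_cons, List.foldl_nil, List.flatMap_append]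
    have h4 : k % 4 = 0 ∨ k % 4 = 1 ∨ k % 4 = 2 ∨ k % 4 = 3 := by omega
    rcases h4 with h | h | h | h
    · have hd : (4 : Int) ∣ (k : Int) := by omega
      have h2 : k % 2 = 0 := by omega
      simp [hd, h, h2, List.flatMap]
    · have hd : ¬ (4 : Int) ∣ (k : Int) := by omega
      have hk4 : ¬ ((k : Int) % 4 = 2) := by omega
      have h2 : k % 2 = 1 := by omega
      simp [hd, hk4, h, h2, List.flatMap]
    · have hk4 : (k : Int) % 4 = 2 := by omega
      have h2 : k % 2 = 0 := by omega
      simp [hk4, h, h2, List.flatMap]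
    · have hd : ¬ (4 : Int) ∣ (k : Int) := by omega
      have hk4 : ¬ ((k : Int) % 4 = 2) := by omega
      have h2 : k % 2 = 1 := by omega
      simp [hd, hk4, h, h2, List.flatMap]

-- ===== VERDICT (by name: the statement is the Claim_ definition above) =====
theorem szyfr_spec : Claim_equal_szyfr := by
  intro tekst _
  unfold Spec_szyfr szyfr szyfr_alt
  simp only [PySem.Str.len_eq]
  rw [pvBfold tekst.toList tekst.toList.length]
  simp only [PySem.List.foldl_append_eq_flatMap, List.nil_append]
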